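-- pv_equiv track=rewrite | github.com/c3sr/split-ner | splitner/dataset.py | make_pattern_type2
-- ===== SOURCE A (Python) =====
-- def make_pattern_type2(text):
--     if text == "[CLS]":
--         return "C"
--     if text == "[SEP]":
--         return "S"
--
--     pattern_text = ""
--     for c in text:
--         if "a" <= c <= "z":
--             pattern_text += "l"
--         elif "A" <= c <= "Z":
--             pattern_text += "u"
--         elif "0" <= c <= "9":
--             pattern_text += "d"
--         else:
--             pattern_text += c
--
--     return pattern_text
-- ===== SOURCE B (Python) =====
-- def make_pattern_type2(text):
--     if text == "[CLS]":
--         return "C"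
--     if text == "[SEP]":
--         return "S"
--
--     def sym(c):
--         if "a" <= c <= "z":
--             return "l"
--         if "A" <= c <= "Z":
--             return "u"
--         if "0" <= c <= "9":
--             return "d"
--         return c
--
--     pieces = []
--     i, n = 0, len(text)
--     while i < n:
--         s = sym(text[i])
--         j = i + 1
--         while j < n and sym(text[j]) == s:
--             j += 1
--         pieces.append(s * (j - i))
--         i = j
--     return "".join(pieces)
-- ===== Notes on version B (the rewrite author's own statement) =====
-- stated objective: alternative
-- what changed: Replaces A's per-character append loop by a two-pointer run-length scan: maximal runs of same-symbol characters are located, each run is emitted at once as sym*(j-i), and the pieces are joined at the end.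
import Mathlib
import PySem

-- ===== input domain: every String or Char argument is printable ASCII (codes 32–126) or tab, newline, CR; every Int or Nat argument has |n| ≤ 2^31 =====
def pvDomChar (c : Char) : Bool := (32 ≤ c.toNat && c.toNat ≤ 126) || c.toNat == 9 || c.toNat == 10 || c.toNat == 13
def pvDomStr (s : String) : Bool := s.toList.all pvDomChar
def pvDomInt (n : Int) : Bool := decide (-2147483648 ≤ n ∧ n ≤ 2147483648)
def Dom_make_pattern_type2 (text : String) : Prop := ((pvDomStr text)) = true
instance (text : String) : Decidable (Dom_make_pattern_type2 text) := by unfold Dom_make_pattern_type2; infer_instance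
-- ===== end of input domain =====

-- B replaces A's per-character append loop by a two-pointer run-length scan that emits
-- each maximal same-symbol run at once and joins the pieces (alternative, same O(n) cost).

-- ===== PORT A =====
def make_pattern_type2 (text : String) : String :=
  if text = "[CLS]" then "C"
  else if text = "[SEP]" then "S"
  else
    text.toList.foldl (fun acc c =>
      if 'a' ≤ c ∧ c ≤ 'z' then acc ++ "l"
      else if 'A' ≤ c ∧ c ≤ 'Z' then acc ++ "u"
      else if '0' ≤ c ∧ c ≤ '9' then acc ++ "d"
      else acc ++ String.ofList [c]) ""

-- ===== PORT B =====
-- Source B's inner 'sym' helper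
def pvSym (c : Char) : Char :=
  if 'a' ≤ c ∧ c ≤ 'z' then 'l'
  else if 'A' ≤ c ∧ c ≤ 'Z' then 'u'
  else if '0' ≤ c ∧ c ≤ '9' then 'd'
  else c

-- the inner 'while j < n and sym(text[j]) == s: j += 1' loop: counts the chars of the
-- current run and returns the remaining suffix (j - i - 1 extra chars consumed)
def pvTake (s : Char) : List Char → Nat × List Char
  | [] => (0, [])
  | c :: t => if pvSym c = s then ((pvTake s t).1 + 1, (pvTake s t).2) else (0, c :: t)

theorem pvTake_len (s : Char) (l : List Char) : (pvTake s l).2.length ≤ l.length := by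
  induction l with
  | nil => simp [pvTake]
  | cons c t ih =>
    simp only [pvTake]
    split_ifs <;> simp <;> omega

-- the outer 'while i < n' loop: the list of (symbol, run length) pieces
def pvRuns : List Char → List (Char × Nat)
  | [] => []
  | c :: t => (pvSym c, (pvTake (pvSym c) t).1 + 1) :: pvRuns (pvTake (pvSym c) t).2
termination_by l => l.length
decreasing_by exact Nat.lt_succ_of_le (pvTake_len _ _)

-- pieces.append(s * (j - i)); "".join(pieces)
def make_pattern_type2_alt (text : String) : String :=
  if text = "[CLS]" then "C"
  else if text = "[SEP]" then "S"
  else String.ofList ((pvRuns text.toList).flatMap (fun p => List.replicate p.2 p.1))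

-- ===== PRECONDITION & SPEC =====
def Spec_make_pattern_type2 (text : String) (out : String) : Prop := out = make_pattern_type2_alt text
instance (text : String) (out : String) : Decidable (Spec_make_pattern_type2 text out) := by unfold Spec_make_pattern_type2; infer_instance

-- ===== CLAIM (what is proved, stated in full; the proofs are below) =====
def Claim_equal_make_pattern_type2 : Prop := ∀ (text : String), Dom_make_pattern_type2 text → Spec_make_pattern_type2 text (make_pattern_type2 text)

-- ===== LEMMAS AND PROOFS =====

-- A's fold produces acc ++ the per-character symbol string
theorem pvFoldA (l : List Char) (acc : String) :
    l.foldl (fun acc c =>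
      if 'a' ≤ c ∧ c ≤ 'z' then acc ++ "l"
      else if 'A' ≤ c ∧ c ≤ 'Z' then acc ++ "u"
      else if '0' ≤ c ∧ c ≤ '9' then acc ++ "d"
      else acc ++ String.ofList [c]) acc = acc ++ String.ofList (l.map pvSym) := by
  induction l generalizing acc with
  | nil => simp
  | cons c t ih =>
    simp only [List.foldl_cons, List.map_cons]
    split_ifs with h1 h2 h3
    · rw [ih]; apply String.ext; simp [pvSym, h1]
    · rw [ih]; apply String.ext; simp [pvSym, h1, h2]
    · rw [ih]; apply String.ext; simp [pvSym, h1, h2, h3]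
    · rw [ih]; apply String.ext; simp [pvSym, h1, h2, h3]

-- the chars consumed by pvTake all have symbol s
theorem pvTake_spec (s : Char) (l : List Char) :
    List.replicate (pvTake s l).1 s ++ ((pvTake s l).2.map pvSym) = l.map pvSym := by
  induction l with
  | nil => simp [pvTake]
  | cons c t ih =>
    simp only [pvTake]
    split_ifs with h
    · simpa [List.replicate_succ, h] using ih
    · simp

-- flattening the runs recovers the per-character symbol string
theorem pvRuns_spec (l : List Char) :
    (pvRuns l).flatMap (fun p => List.replicate p.2 p.1) = l.map pvSym := by
  induction l using pvRuns.induct with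
  | case1 => simp [pvRuns]
  | case2 c t ih =>
    rw [pvRuns]
    simp only [List.flatMap_cons, ih, List.map_cons, List.replicate_succ, List.cons_append]
    rw [pvTake_spec]

-- ===== VERDICT (by name: the statement is the Claim_ definition above) =====
theorem make_pattern_type2_spec : Claim_equal_make_pattern_type2 := by
  intro text _
  unfold Spec_make_pattern_type2 make_pattern_type2 make_pattern_type2_alt
  split_ifs <;> try rfl
  rw [pvFoldA, pvRuns_spec]
  apply String.ext
  simp
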